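-- pv_equiv track=rewrite | github.com/coveo-labs/store-generator | src/4_pushToCatalog.py | createCategoriesSlug
-- ===== SOURCE A (Python) =====
-- def createCategoriesSlug(categories):
--   slug=[]
--   catpath=''
--   for cat in categories:
--     cat=cat.lower().replace(' ','-')
--     if catpath=='':
--       catpath=cat #man
--       slug.append(catpath)
--     else:
--       catpath=catpath+'/'+cat
--       slug.append(catpath)
--
--   #slug = list(set(catpaths))
--
--   return slug
-- ===== SOURCE B (Python) =====
-- def createCategoriesSlug(categories):
--   norm = [c.lower().replace(' ', '-') for c in categories]
--   return ['/'.join(norm[:i + 1]) for i in range(len(norm))]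
-- ===== Notes on version B (the rewrite author's own statement) =====
-- stated objective: simpler
-- what changed: Replaces the single-pass running-accumulator string (catpath) and its empty-string branch with a two-phase normalize-then-join: each output element is computed independently as '/'.join of a prefix slice of the normalized list.
-- intended difference: On lists of length at least two whose first element is the empty string, A's catpath=='' start test fires again on the second iteration and silently drops the leading empty path component, while B returns the uniform cumulative prefix joins (a leading '/' before each later element), which is the intended cumulative-path behaviour. — e.g. on createCategoriesSlug(["", ""]): A returns ["", ""], B returns ["", "/"]
import Mathlib
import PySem

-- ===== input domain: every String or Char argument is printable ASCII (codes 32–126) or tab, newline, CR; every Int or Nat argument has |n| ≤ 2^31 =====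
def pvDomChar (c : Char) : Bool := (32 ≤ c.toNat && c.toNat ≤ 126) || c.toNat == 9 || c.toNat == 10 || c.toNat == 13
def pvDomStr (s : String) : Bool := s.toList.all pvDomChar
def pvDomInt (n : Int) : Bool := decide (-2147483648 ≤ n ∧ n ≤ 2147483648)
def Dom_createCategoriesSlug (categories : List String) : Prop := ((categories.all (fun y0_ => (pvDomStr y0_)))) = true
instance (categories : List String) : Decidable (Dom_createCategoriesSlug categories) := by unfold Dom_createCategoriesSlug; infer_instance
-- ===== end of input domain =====

-- B replaces A's running catpath accumulator (with its catpath=='' branch) by independent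
-- '/'-joins of prefixes of the normalized list (objective: simpler decomposition).

-- ===== PORT A =====
-- the for-loop of A: state = (slug, catpath)
def pvALoop : List String → List String → String → List String
  | [], slug, _ => slug
  | cat :: rest, slug, catpath =>
    let c := PySem.Str.replace (PySem.Str.lower cat) " " "-"
    if catpath = "" then pvALoop rest (slug ++ [c]) c
    else pvALoop rest (slug ++ [catpath ++ "/" ++ c]) (catpath ++ "/" ++ c)

def createCategoriesSlug (categories : List String) : List String :=
  pvALoop categories [] ""

-- ===== PORT B =====
def createCategoriesSlug_alt (categories : List String) : List String :=
  let norm := categories.map (fun c => PySem.Str.replace (PySem.Str.lower c) " " "-")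
  (List.range norm.length).map (fun i => PySem.Str.join "/" (norm.take (i + 1)))

-- ===== PRECONDITION & SPEC =====
-- On lists of length ≥ 2 whose first element is the empty string, A's catpath=='' start test
-- fires again on the second iteration and silently drops the leading empty path component;
-- B returns the uniform cumulative prefix joins, the intended cumulative-path behaviour.
def D_createCategoriesSlug (categories : List String) : Prop :=
  2 ≤ categories.length ∧ categories.head? = some ""
instance (categories : List String) : Decidable (D_createCategoriesSlug categories) := by
  unfold D_createCategoriesSlug; infer_instance

def Spec_createCategoriesSlug (categories : List String) (out : List String) : Prop :=
  ¬ D_createCategoriesSlug categories → out = createCategoriesSlug_alt categories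
instance (categories : List String) (out : List String) : Decidable (Spec_createCategoriesSlug categories out) := by
  unfold Spec_createCategoriesSlug; infer_instance

def pvDiffWitness_createCategoriesSlug : List String := ["", ""]
def pvDiffWitnessOut_createCategoriesSlug : (List String) × (List String) := (["", ""], ["", "/"])

-- ===== CLAIM (what is proved, stated in full; the proofs are below) =====
def Claim_unchanged_createCategoriesSlug : Prop := ∀ (categories : List String), Dom_createCategoriesSlug categories → Spec_createCategoriesSlug categories (createCategoriesSlug categories)
def Claim_changed_createCategoriesSlug : Prop := Dom_createCategoriesSlug (pvDiffWitness_createCategoriesSlug) ∧ D_createCategoriesSlug (pvDiffWitness_createCategoriesSlug) ∧ createCategoriesSlug (pvDiffWitness_createCategoriesSlug) = pvDiffWitnessOut_createCategoriesSlug.1 ∧ createCategoriesSlug_alt (pvDiffWitness_createCategoriesSlug) = pvDiffWitnessOut_createCategoriesSlug.2 ∧ pvDiffWitnessOut_createCategoriesSlug.1 ≠ pvDiffWitnessOut_createCategoriesSlug.2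
def Claim_exact_createCategoriesSlug : Prop := ∀ (categories : List String), Dom_createCategoriesSlug categories → D_createCategoriesSlug categories → createCategoriesSlug categories ≠ createCategoriesSlug_alt categories

-- ===== LEMMAS AND PROOFS =====

-- the normalization both Pythons apply to each category
def pvN (s : String) : String := PySem.Str.replace (PySem.Str.lower s) " " "-"

theorem pvALoop_cons_empty (cat : String) (rest slug : List String) :
    pvALoop (cat :: rest) slug "" = pvALoop rest (slug ++ [pvN cat]) (pvN cat) := by
  simp [pvALoop, pvN]

theorem pvALoop_cons_ne (cat p : String) (hp : p ≠ "") (rest slug : List String) :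
    pvALoop (cat :: rest) slug p
      = pvALoop rest (slug ++ [p ++ "/" ++ pvN cat]) (p ++ "/" ++ pvN cat) := by
  simp [pvALoop, pvN, hp]

-- a string ending in "/" ++ c is never empty
theorem pv_app_ne_empty (p c : String) : p ++ "/" ++ c ≠ "" := by
  intro h
  have h' := congrArg String.toList h
  simp at h'

-- Chars.replace.go with nonempty `new` returns [] only from l = [], acc = []
theorem pv_go_ne_nil : ∀ (fuel : Nat) (l acc : List Char), l ≠ [] ∨ acc ≠ [] →
    PySem.Chars.replace.go [' '] ['-'] fuel l acc ≠ [] := by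
  intro fuel
  induction fuel with
  | zero =>
    intro l acc h
    rw [PySem.Chars.replace.go]
    rcases h with h | h <;> simp [h]
  | succ n ih =>
    intro l acc h
    cases l with
    | nil =>
      rw [PySem.Chars.replace.go]
      rcases h with h | h
      · exact absurd rfl h
      · simp [h]
      all_goals intro hk
      all_goals exact absurd hk (Nat.succ_ne_zero n)
    | cons c t =>
      rw [PySem.Chars.replace.go]
      split
      · exact ih _ _ (Or.inr (by simp))
      · exact ih _ _ (Or.inr (by simp))

-- normalization of a nonempty string is nonempty
theorem pvN_ne_empty (c : String) (h : c ≠ "") : pvN c ≠ "" := by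
  intro he
  have h' := congrArg String.toList he
  rw [pvN, PySem.Str.toList_replace, PySem.Str.toList_lower] at h'
  have hsp : (" " : String).toList = [' '] := by decide
  have hds : ("-" : String).toList = ['-'] := by decide
  rw [hsp, hds] at h'
  have hl : PySem.Chars.lower c.toList ≠ [] := by
    simp only [PySem.Chars.lower, ne_eq, List.map_eq_nil_iff]
    intro hc
    exact h (by rw [← String.toList_inj, hc]; rfl)
  rw [PySem.Chars.replace] at h'
  simp at h'
  exact pv_go_ne_nil _ _ _ (Or.inl hl) h'

-- cumulative joins continued from accumulated path p
def pvPJ (p : String) : List String → List String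
  | [] => []
  | n :: ns => (p ++ "/" ++ n) :: pvPJ (p ++ "/" ++ n) ns

theorem pv_aLoop_eq : ∀ (rest slug : List String) (p : String), p ≠ "" →
    pvALoop rest slug p = slug ++ pvPJ p (rest.map pvN) := by
  intro rest
  induction rest with
  | nil => intro slug p _; simp [pvALoop, pvPJ]
  | cons c t ih =>
    intro slug p hp
    rw [pvALoop_cons_ne c p hp]
    rw [ih _ _ (pv_app_ne_empty p (pvN c))]
    simp [pvPJ]

theorem pv_aLoop_prefix : ∀ (rest slug : List String) (p : String),
    ∃ ys, pvALoop rest slug p = slug ++ ys := by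
  intro rest
  induction rest with
  | nil => intro slug p; exact ⟨[], by simp [pvALoop]⟩
  | cons c t ih =>
    intro slug p
    by_cases hp : p = ""
    · subst hp
      rw [pvALoop_cons_empty]
      obtain ⟨ys, hys⟩ := ih (slug ++ [pvN c]) (pvN c)
      exact ⟨pvN c :: ys, by rw [hys]; simp⟩
    · rw [pvALoop_cons_ne c p hp]
      obtain ⟨ys, hys⟩ := ih (slug ++ [p ++ "/" ++ pvN c]) (p ++ "/" ++ pvN c)
      exact ⟨(p ++ "/" ++ pvN c) :: ys, by rw [hys]; simp⟩

theorem pv_join_singleton (p : String) : PySem.Str.join "/" [p] = p := by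
  rw [← String.toList_inj, PySem.Str.toList_join]
  simp [PySem.Chars.join_singleton]

theorem pv_join_cons_cons (a b : String) (l : List String) :
    PySem.Str.join "/" (a :: b :: l) = a ++ "/" ++ PySem.Str.join "/" (b :: l) := by
  rw [← String.toList_inj, PySem.Str.toList_join]
  simp [PySem.Chars.join_cons_cons, PySem.Str.toList_join]

theorem pv_pj_map : ∀ (t : List String) (x p : String),
    pvPJ (p ++ "/" ++ x) t = (pvPJ x t).map (fun s => p ++ "/" ++ s) := by
  intro t
  induction t with
  | nil => intro x p; simp [pvPJ]
  | cons y t' ih =>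
    intro x p
    rw [pvPJ, pvPJ]
    have h1 : p ++ "/" ++ x ++ "/" ++ y = p ++ "/" ++ (x ++ "/" ++ y) := by
      rw [← String.toList_inj]; simp
    rw [List.map_cons, h1, ih]

theorem pv_alt_cons : ∀ (t : List String) (p : String),
    (List.range (t.length + 1)).map (fun i => PySem.Str.join "/" ((p :: t).take (i + 1)))
      = p :: pvPJ p t := by
  intro t
  induction t with
  | nil =>
    intro p
    simp [List.range_succ, pv_join_singleton, pvPJ]
  | cons x t' ih =>
    intro p
    rw [List.range_succ_eq_map, List.map_cons, List.map_map]
    have hfun : ((fun i => PySem.Str.join "/" ((p :: x :: t').take (i + 1))) ∘ (· + 1))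
        = (fun s => p ++ "/" ++ s) ∘ (fun i => PySem.Str.join "/" ((x :: t').take (i + 1))) := by
      funext i
      simp only [Function.comp, List.take_succ_cons]
      exact pv_join_cons_cons p x (t'.take i)
    rw [hfun, ← List.map_map, List.length_cons, ih, pvPJ]
    simp [pv_join_singleton, pv_pj_map]

-- ===== VERDICT (by name: the statement is the Claim_ definition above) =====
theorem createCategoriesSlug_spec : Claim_unchanged_createCategoriesSlug := by
  intro categories _ hD
  cases categories with
  | nil => simp [createCategoriesSlug, createCategoriesSlug_alt, pvALoop]
  | cons c rest =>
    show pvALoop (c :: rest) [] "" = _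
    rw [pvALoop_cons_empty]
    cases rest with
    | nil =>
      simp [pvALoop, createCategoriesSlug_alt, List.range_succ, pv_join_singleton, pvN]
    | cons x rest' =>
      have hc : c ≠ "" := by
        intro hc
        exact hD ⟨by simp, by simp [hc]⟩
      rw [pv_aLoop_eq _ _ _ (pvN_ne_empty c hc)]
      show ([] ++ [pvN c]) ++ pvPJ (pvN c) ((x :: rest').map pvN)
          = (List.range ((pvN x :: rest'.map pvN).length + 1)).map
              (fun i => PySem.Str.join "/" ((pvN c :: pvN x :: rest'.map pvN).take (i + 1)))
      rw [pv_alt_cons (pvN x :: rest'.map pvN) (pvN c)]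
      simp [pvPJ]

theorem createCategoriesSlug_changed : Claim_changed_createCategoriesSlug := by
  unfold Claim_changed_createCategoriesSlug; decide

theorem createCategoriesSlug_tight : Claim_exact_createCategoriesSlug := by
  intro categories _ hD heq
  obtain ⟨hlen, hhd⟩ := hD
  cases categories with
  | nil => simp at hhd
  | cons h0 rest =>
    cases rest with
    | nil => simp at hlen
    | cons c rest' =>
      simp at hhd
      subst hhd
      have hN0 : pvN "" = "" := by decide
      have hA : ∃ ys, createCategoriesSlug ("" :: c :: rest') = "" :: pvN c :: ys := by
        show ∃ ys, pvALoop ("" :: c :: rest') [] "" = _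
        rw [pvALoop_cons_empty, hN0, pvALoop_cons_empty]
        obtain ⟨ys, hys⟩ := pv_aLoop_prefix rest' (([] ++ [""]) ++ [pvN c]) (pvN c)
        exact ⟨ys, by rw [hys]; simp⟩
      have hB : createCategoriesSlug_alt ("" :: c :: rest')
          = "" :: ("" ++ "/" ++ pvN c) :: pvPJ ("" ++ "/" ++ pvN c) (rest'.map pvN) := by
        show (List.range ((pvN c :: rest'.map pvN).length + 1)).map
              (fun i => PySem.Str.join "/" ((pvN "" :: pvN c :: rest'.map pvN).take (i + 1))) = _
        rw [hN0, pv_alt_cons (pvN c :: rest'.map pvN) "", pvPJ]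
      obtain ⟨ys, hys⟩ := hA
      rw [hys, hB] at heq
      simp at heq
      have h2 : pvN c = "" ++ "/" ++ pvN c := heq.1
      have h3 := congrArg (fun s => s.toList.length) h2
      simp at h3
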